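-- pv_equiv track=rewrite | github.com/mcoski8/tw | analysis/scripts/pretest_v3_bleed_zones.py | bot_suit_profile
-- ===== SOURCE A (Python) =====
-- from collections import Counter, defaultdict
--
-- def bot_suit_profile(suits: tuple[int, int, int, int]) -> str:
--     """Classify a 4-card suit profile."""
--     counts = sorted(Counter(suits).values(), reverse=True)
--     while len(counts) < 4:
--         counts.append(0)
--     if counts[0] == 4:
--         return "monosuit"  # 4 of a suit — bad in Omaha 2+3
--     if counts[0] == 3:
--         return "3-suited"  # 3 of a suit — bad
--     if counts[0] == 2 and counts[1] == 2:
--         return "double_suited"  # best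
--     if counts[0] == 2 and counts[1] == 1:
--         return "single_suited"
--     return "rainbow"
-- ===== SOURCE B (Python) =====
-- from collections import Counter
--
-- def bot_suit_profile(suits: tuple[int, int, int, int]) -> str:
--     """Classify a 4-card suit profile."""
--     n = len(set(suits))
--     if n == 1:
--         return "monosuit"
--     if n == 4:
--         return "rainbow"
--     if n == 3:
--         return "single_suited"
--     # n == 2: either 3+1 or 2+2
--     return "3-suited" if max(Counter(suits).values()) == 3 else "double_suited"
-- ===== Notes on version B (the rewrite author's own statement) =====
-- stated objective: simpler
-- what changed: B classifies by the number of distinct suits (len(set(suits))) instead of sorting and zero-padding the multiset of Counter values, only consulting the max count to split the two-distinct-suits case.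
import Mathlib
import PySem

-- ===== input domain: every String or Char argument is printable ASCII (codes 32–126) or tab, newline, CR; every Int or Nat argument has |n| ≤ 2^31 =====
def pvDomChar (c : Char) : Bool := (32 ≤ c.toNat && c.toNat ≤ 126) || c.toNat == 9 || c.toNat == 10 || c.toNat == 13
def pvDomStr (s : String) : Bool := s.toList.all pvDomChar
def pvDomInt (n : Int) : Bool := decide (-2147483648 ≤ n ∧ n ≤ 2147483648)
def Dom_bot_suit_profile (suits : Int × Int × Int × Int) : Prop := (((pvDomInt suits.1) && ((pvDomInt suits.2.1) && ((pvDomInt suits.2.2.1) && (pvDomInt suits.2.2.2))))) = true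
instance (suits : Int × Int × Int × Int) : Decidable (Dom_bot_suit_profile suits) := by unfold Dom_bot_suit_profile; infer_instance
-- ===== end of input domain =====

-- B classifies by the number of distinct suits instead of sorting/padding the Counter values; simpler, same value everywhere.

-- ===== PORT A =====
-- the 'while len(counts) < 4: counts.append(0)' loop
def pvPadTo4 (l : List Int) : List Int :=
  if l.length < 4 then pvPadTo4 (l ++ [0]) else l
  termination_by 4 - l.length
  decreasing_by simp_all; omega

def bot_suit_profile (suits : Int × Int × Int × Int) : String :=
  let xs := [suits.1, suits.2.1, suits.2.2.1, suits.2.2.2]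
  let counts := pvPadTo4 (PySem.List.sorted ((PySem.Dict.counter xs).values) (fun x => x) true)
  if PySem.List.pyGetD counts 0 0 = 4 then "monosuit"
  else if PySem.List.pyGetD counts 0 0 = 3 then "3-suited"
  else if PySem.List.pyGetD counts 0 0 = 2 ∧ PySem.List.pyGetD counts 1 0 = 2 then "double_suited"
  else if PySem.List.pyGetD counts 0 0 = 2 ∧ PySem.List.pyGetD counts 1 0 = 1 then "single_suited"
  else "rainbow"

-- ===== PORT B =====
def bot_suit_profile_alt (suits : Int × Int × Int × Int) : String :=
  let xs := [suits.1, suits.2.1, suits.2.2.1, suits.2.2.2]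
  let n := (PySem.Set.ofList xs).length
  if n = 1 then "monosuit"
  else if n = 4 then "rainbow"
  else if n = 3 then "single_suited"
  else if PySem.List.max? ((PySem.Dict.counter xs).values) (fun v => v) = some 3 then "3-suited"
  else "double_suited"

-- ===== PRECONDITION & SPEC =====
def Spec_bot_suit_profile (suits : Int × Int × Int × Int) (out : String) : Prop := out = bot_suit_profile_alt suits
instance (suits : Int × Int × Int × Int) (out : String) : Decidable (Spec_bot_suit_profile suits out) := by unfold Spec_bot_suit_profile; infer_instance

-- ===== CLAIM (what is proved, stated in full; the proofs are below) =====
def Claim_equal_bot_suit_profile : Prop := ∀ (suits : Int × Int × Int × Int), Dom_bot_suit_profile suits → Spec_bot_suit_profile suits (bot_suit_profile suits)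

-- ===== LEMMAS AND PROOFS =====

lemma pv_aaaa (a : Int) :
    bot_suit_profile (a,a,a,a) = bot_suit_profile_alt (a,a,a,a) := by

  have hs : PySem.Set.ofList [a,a,a,a] = [a] := by
    simp [PySem.Set.ofList, PySem.Set.add]
  have hv : (PySem.Dict.counter [a,a,a,a]).values = [4] := by
    simp [PySem.Dict.values, PySem.Dict.items_counter, hs, List.count_cons]
  simp [bot_suit_profile, bot_suit_profile_alt, hv, hs, pvPadTo4, PySem.List.sorted,
    PySem.List.insertBy, PySem.List.pyGetD, PySem.List.pyGet?, PySem.List.pyIdx?, PySem.List.max?]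

lemma pv_aaab (a b : Int) (hab : ¬ a = b) :
    bot_suit_profile (a,a,a,b) = bot_suit_profile_alt (a,a,a,b) := by
  have hba : ¬ b = a := fun h => hab h.symm
  have hs : PySem.Set.ofList [a,a,a,b] = [a,b] := by
    simp [PySem.Set.ofList, PySem.Set.add, hab, hba]
  have hv : (PySem.Dict.counter [a,a,a,b]).values = [3,1] := by
    simp [PySem.Dict.values, PySem.Dict.items_counter, hs, List.count_cons, hab, hba]
  simp [bot_suit_profile, bot_suit_profile_alt, hv, hs, pvPadTo4, PySem.List.sorted,
    PySem.List.insertBy, PySem.List.pyGetD, PySem.List.pyGet?, PySem.List.pyIdx?, PySem.List.max?]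

lemma pv_aaba (a b : Int) (hab : ¬ a = b) :
    bot_suit_profile (a,a,b,a) = bot_suit_profile_alt (a,a,b,a) := by
  have hba : ¬ b = a := fun h => hab h.symm
  have hs : PySem.Set.ofList [a,a,b,a] = [a,b] := by
    simp [PySem.Set.ofList, PySem.Set.add, hab, hba]
  have hv : (PySem.Dict.counter [a,a,b,a]).values = [3,1] := by
    simp [PySem.Dict.values, PySem.Dict.items_counter, hs, List.count_cons, hab, hba]
  simp [bot_suit_profile, bot_suit_profile_alt, hv, hs, pvPadTo4, PySem.List.sorted,
    PySem.List.insertBy, PySem.List.pyGetD, PySem.List.pyGet?, PySem.List.pyIdx?, PySem.List.max?]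

lemma pv_abaa (a b : Int) (hab : ¬ a = b) :
    bot_suit_profile (a,b,a,a) = bot_suit_profile_alt (a,b,a,a) := by
  have hba : ¬ b = a := fun h => hab h.symm
  have hs : PySem.Set.ofList [a,b,a,a] = [a,b] := by
    simp [PySem.Set.ofList, PySem.Set.add, hab, hba]
  have hv : (PySem.Dict.counter [a,b,a,a]).values = [3,1] := by
    simp [PySem.Dict.values, PySem.Dict.items_counter, hs, List.count_cons, hab, hba]
  simp [bot_suit_profile, bot_suit_profile_alt, hv, hs, pvPadTo4, PySem.List.sorted,
    PySem.List.insertBy, PySem.List.pyGetD, PySem.List.pyGet?, PySem.List.pyIdx?, PySem.List.max?]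

lemma pv_abbb (a b : Int) (hab : ¬ a = b) :
    bot_suit_profile (a,b,b,b) = bot_suit_profile_alt (a,b,b,b) := by
  have hba : ¬ b = a := fun h => hab h.symm
  have hs : PySem.Set.ofList [a,b,b,b] = [a,b] := by
    simp [PySem.Set.ofList, PySem.Set.add, hab, hba]
  have hv : (PySem.Dict.counter [a,b,b,b]).values = [1,3] := by
    simp [PySem.Dict.values, PySem.Dict.items_counter, hs, List.count_cons, hab, hba]
  simp [bot_suit_profile, bot_suit_profile_alt, hv, hs, pvPadTo4, PySem.List.sorted,
    PySem.List.insertBy, PySem.List.pyGetD, PySem.List.pyGet?, PySem.List.pyIdx?, PySem.List.max?]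

lemma pv_aabb (a b : Int) (hab : ¬ a = b) :
    bot_suit_profile (a,a,b,b) = bot_suit_profile_alt (a,a,b,b) := by
  have hba : ¬ b = a := fun h => hab h.symm
  have hs : PySem.Set.ofList [a,a,b,b] = [a,b] := by
    simp [PySem.Set.ofList, PySem.Set.add, hab, hba]
  have hv : (PySem.Dict.counter [a,a,b,b]).values = [2,2] := by
    simp [PySem.Dict.values, PySem.Dict.items_counter, hs, List.count_cons, hab, hba]
  simp [bot_suit_profile, bot_suit_profile_alt, hv, hs, pvPadTo4, PySem.List.sorted,
    PySem.List.insertBy, PySem.List.pyGetD, PySem.List.pyGet?, PySem.List.pyIdx?, PySem.List.max?]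

lemma pv_abab (a b : Int) (hab : ¬ a = b) :
    bot_suit_profile (a,b,a,b) = bot_suit_profile_alt (a,b,a,b) := by
  have hba : ¬ b = a := fun h => hab h.symm
  have hs : PySem.Set.ofList [a,b,a,b] = [a,b] := by
    simp [PySem.Set.ofList, PySem.Set.add, hab, hba]
  have hv : (PySem.Dict.counter [a,b,a,b]).values = [2,2] := by
    simp [PySem.Dict.values, PySem.Dict.items_counter, hs, List.count_cons, hab, hba]
  simp [bot_suit_profile, bot_suit_profile_alt, hv, hs, pvPadTo4, PySem.List.sorted,
    PySem.List.insertBy, PySem.List.pyGetD, PySem.List.pyGet?, PySem.List.pyIdx?, PySem.List.max?]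

lemma pv_abba (a b : Int) (hab : ¬ a = b) :
    bot_suit_profile (a,b,b,a) = bot_suit_profile_alt (a,b,b,a) := by
  have hba : ¬ b = a := fun h => hab h.symm
  have hs : PySem.Set.ofList [a,b,b,a] = [a,b] := by
    simp [PySem.Set.ofList, PySem.Set.add, hab, hba]
  have hv : (PySem.Dict.counter [a,b,b,a]).values = [2,2] := by
    simp [PySem.Dict.values, PySem.Dict.items_counter, hs, List.count_cons, hab, hba]
  simp [bot_suit_profile, bot_suit_profile_alt, hv, hs, pvPadTo4, PySem.List.sorted,
    PySem.List.insertBy, PySem.List.pyGetD, PySem.List.pyGet?, PySem.List.pyIdx?, PySem.List.max?]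

lemma pv_aabc (a b c : Int) (hab : ¬ a = b) (hac : ¬ a = c) (hbc : ¬ b = c) :
    bot_suit_profile (a,a,b,c) = bot_suit_profile_alt (a,a,b,c) := by
  have hba : ¬ b = a := fun h => hab h.symm
  have hca : ¬ c = a := fun h => hac h.symm
  have hcb : ¬ c = b := fun h => hbc h.symm
  have hs : PySem.Set.ofList [a,a,b,c] = [a,b,c] := by
    simp [PySem.Set.ofList, PySem.Set.add, hab, hac, hbc, hba, hca, hcb]
  have hv : (PySem.Dict.counter [a,a,b,c]).values = [2,1,1] := by
    simp [PySem.Dict.values, PySem.Dict.items_counter, hs, List.count_cons, hab, hac, hbc, hba, hca, hcb]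
  simp [bot_suit_profile, bot_suit_profile_alt, hv, hs, pvPadTo4, PySem.List.sorted,
    PySem.List.insertBy, PySem.List.pyGetD, PySem.List.pyGet?, PySem.List.pyIdx?, PySem.List.max?]

lemma pv_abac (a b c : Int) (hab : ¬ a = b) (hac : ¬ a = c) (hbc : ¬ b = c) :
    bot_suit_profile (a,b,a,c) = bot_suit_profile_alt (a,b,a,c) := by
  have hba : ¬ b = a := fun h => hab h.symm
  have hca : ¬ c = a := fun h => hac h.symm
  have hcb : ¬ c = b := fun h => hbc h.symm
  have hs : PySem.Set.ofList [a,b,a,c] = [a,b,c] := by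
    simp [PySem.Set.ofList, PySem.Set.add, hab, hac, hbc, hba, hca, hcb]
  have hv : (PySem.Dict.counter [a,b,a,c]).values = [2,1,1] := by
    simp [PySem.Dict.values, PySem.Dict.items_counter, hs, List.count_cons, hab, hac, hbc, hba, hca, hcb]
  simp [bot_suit_profile, bot_suit_profile_alt, hv, hs, pvPadTo4, PySem.List.sorted,
    PySem.List.insertBy, PySem.List.pyGetD, PySem.List.pyGet?, PySem.List.pyIdx?, PySem.List.max?]

lemma pv_abca (a b c : Int) (hab : ¬ a = b) (hac : ¬ a = c) (hbc : ¬ b = c) :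
    bot_suit_profile (a,b,c,a) = bot_suit_profile_alt (a,b,c,a) := by
  have hba : ¬ b = a := fun h => hab h.symm
  have hca : ¬ c = a := fun h => hac h.symm
  have hcb : ¬ c = b := fun h => hbc h.symm
  have hs : PySem.Set.ofList [a,b,c,a] = [a,b,c] := by
    simp [PySem.Set.ofList, PySem.Set.add, hab, hac, hbc, hba, hca, hcb]
  have hv : (PySem.Dict.counter [a,b,c,a]).values = [2,1,1] := by
    simp [PySem.Dict.values, PySem.Dict.items_counter, hs, List.count_cons, hab, hac, hbc, hba, hca, hcb]
  simp [bot_suit_profile, bot_suit_profile_alt, hv, hs, pvPadTo4, PySem.List.sorted,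
    PySem.List.insertBy, PySem.List.pyGetD, PySem.List.pyGet?, PySem.List.pyIdx?, PySem.List.max?]

lemma pv_abbc (a b c : Int) (hab : ¬ a = b) (hac : ¬ a = c) (hbc : ¬ b = c) :
    bot_suit_profile (a,b,b,c) = bot_suit_profile_alt (a,b,b,c) := by
  have hba : ¬ b = a := fun h => hab h.symm
  have hca : ¬ c = a := fun h => hac h.symm
  have hcb : ¬ c = b := fun h => hbc h.symm
  have hs : PySem.Set.ofList [a,b,b,c] = [a,b,c] := by
    simp [PySem.Set.ofList, PySem.Set.add, hab, hac, hbc, hba, hca, hcb]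
  have hv : (PySem.Dict.counter [a,b,b,c]).values = [1,2,1] := by
    simp [PySem.Dict.values, PySem.Dict.items_counter, hs, List.count_cons, hab, hac, hbc, hba, hca, hcb]
  simp [bot_suit_profile, bot_suit_profile_alt, hv, hs, pvPadTo4, PySem.List.sorted,
    PySem.List.insertBy, PySem.List.pyGetD, PySem.List.pyGet?, PySem.List.pyIdx?, PySem.List.max?]

lemma pv_abcb (a b c : Int) (hab : ¬ a = b) (hac : ¬ a = c) (hbc : ¬ b = c) :
    bot_suit_profile (a,b,c,b) = bot_suit_profile_alt (a,b,c,b) := by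
  have hba : ¬ b = a := fun h => hab h.symm
  have hca : ¬ c = a := fun h => hac h.symm
  have hcb : ¬ c = b := fun h => hbc h.symm
  have hs : PySem.Set.ofList [a,b,c,b] = [a,b,c] := by
    simp [PySem.Set.ofList, PySem.Set.add, hab, hac, hbc, hba, hca, hcb]
  have hv : (PySem.Dict.counter [a,b,c,b]).values = [1,2,1] := by
    simp [PySem.Dict.values, PySem.Dict.items_counter, hs, List.count_cons, hab, hac, hbc, hba, hca, hcb]
  simp [bot_suit_profile, bot_suit_profile_alt, hv, hs, pvPadTo4, PySem.List.sorted,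
    PySem.List.insertBy, PySem.List.pyGetD, PySem.List.pyGet?, PySem.List.pyIdx?, PySem.List.max?]

lemma pv_abcc (a b c : Int) (hab : ¬ a = b) (hac : ¬ a = c) (hbc : ¬ b = c) :
    bot_suit_profile (a,b,c,c) = bot_suit_profile_alt (a,b,c,c) := by
  have hba : ¬ b = a := fun h => hab h.symm
  have hca : ¬ c = a := fun h => hac h.symm
  have hcb : ¬ c = b := fun h => hbc h.symm
  have hs : PySem.Set.ofList [a,b,c,c] = [a,b,c] := by
    simp [PySem.Set.ofList, PySem.Set.add, hab, hac, hbc, hba, hca, hcb]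
  have hv : (PySem.Dict.counter [a,b,c,c]).values = [1,1,2] := by
    simp [PySem.Dict.values, PySem.Dict.items_counter, hs, List.count_cons, hab, hac, hbc, hba, hca, hcb]
  simp [bot_suit_profile, bot_suit_profile_alt, hv, hs, pvPadTo4, PySem.List.sorted,
    PySem.List.insertBy, PySem.List.pyGetD, PySem.List.pyGet?, PySem.List.pyIdx?, PySem.List.max?]

lemma pv_abcd (a b c d : Int) (hab : ¬ a = b) (hac : ¬ a = c) (had : ¬ a = d) (hbc : ¬ b = c) (hbd : ¬ b = d) (hcd : ¬ c = d) :
    bot_suit_profile (a,b,c,d) = bot_suit_profile_alt (a,b,c,d) := by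
  have hba : ¬ b = a := fun h => hab h.symm
  have hca : ¬ c = a := fun h => hac h.symm
  have hda : ¬ d = a := fun h => had h.symm
  have hcb : ¬ c = b := fun h => hbc h.symm
  have hdb : ¬ d = b := fun h => hbd h.symm
  have hdc : ¬ d = c := fun h => hcd h.symm
  have hs : PySem.Set.ofList [a,b,c,d] = [a,b,c,d] := by
    simp [PySem.Set.ofList, PySem.Set.add, hab, hac, had, hbc, hbd, hcd, hba, hca, hda, hcb, hdb, hdc]
  have hv : (PySem.Dict.counter [a,b,c,d]).values = [1,1,1,1] := by
    simp [PySem.Dict.values, PySem.Dict.items_counter, hs, List.count_cons, hab, hac, had, hbc, hbd, hcd, hba, hca, hda, hcb, hdb, hdc]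
  simp [bot_suit_profile, bot_suit_profile_alt, hv, hs, pvPadTo4, PySem.List.sorted,
    PySem.List.insertBy, PySem.List.pyGetD, PySem.List.pyGet?, PySem.List.pyIdx?, PySem.List.max?]

-- ===== VERDICT (by name: the statement is the Claim_ definition above) =====
theorem bot_suit_profile_spec : Claim_equal_bot_suit_profile := by
  intro suits _
  obtain ⟨a, b, c, d⟩ := suits
  unfold Spec_bot_suit_profile
  by_cases h1 : b = a
  case pos =>
    rw [h1]
    by_cases h2 : c = a
    case pos =>
      rw [h2]
      by_cases h3 : d = a
      case pos =>
        rw [h3]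
        exact pv_aaaa _
      case neg =>
        exact pv_aaab _ _ (by omega)
    case neg =>
      by_cases h4 : d = a
      case pos =>
        rw [h4]
        exact pv_aaba _ _ (by omega)
      case neg =>
        by_cases h5 : d = c
        case pos =>
          rw [h5]
          exact pv_aabb _ _ (by omega)
        case neg =>
          exact pv_aabc _ _ _ (by omega) (by omega) (by omega)
  case neg =>
    by_cases h6 : c = a
    case pos =>
      rw [h6]
      by_cases h7 : d = a
      case pos =>
        rw [h7]
        exact pv_abaa _ _ (by omega)
      case neg =>
        by_cases h8 : d = b
        case pos =>
          rw [h8]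
          exact pv_abab _ _ (by omega)
        case neg =>
          exact pv_abac _ _ _ (by omega) (by omega) (by omega)
    case neg =>
      by_cases h9 : c = b
      case pos =>
        rw [h9]
        by_cases h10 : d = a
        case pos =>
          rw [h10]
          exact pv_abba _ _ (by omega)
        case neg =>
          by_cases h11 : d = b
          case pos =>
            rw [h11]
            exact pv_abbb _ _ (by omega)
          case neg =>
            exact pv_abbc _ _ _ (by omega) (by omega) (by omega)
      case neg =>
        by_cases h12 : d = a
        case pos =>
          rw [h12]
          exact pv_abca _ _ _ (by omega) (by omega) (by omega)
        case neg =>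
          by_cases h13 : d = b
          case pos =>
            rw [h13]
            exact pv_abcb _ _ _ (by omega) (by omega) (by omega)
          case neg =>
            by_cases h14 : d = c
            case pos =>
              rw [h14]
              exact pv_abcc _ _ _ (by omega) (by omega) (by omega)
            case neg =>
              exact pv_abcd _ _ _ _ (by omega) (by omega) (by omega) (by omega) (by omega) (by omega)
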